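-- pv_equiv track=rewrite | github.com/imazen/zentrain-corpus | tools/behavioral_cluster.py | pick_representatives
-- ===== SOURCE A (Python) =====
-- def pick_representatives(clusters: list, per_pair: dict, grid: list[int]):
--     keep = set()
--     mid_q = grid[len(grid) // 2]  # mid-range q point as reference
--     for grp in clusters:
--         best = None
--         best_b = 10**18
--         for key in grp:
--             qmap = per_pair[key]
--             ref = qmap.get(mid_q)
--             if ref is None or ref[1] == -1:
--                 # fall back to any present q
--                 for q in grid:
--                     cand = qmap.get(q)
--                     if cand and cand[1] != -1:
--                         ref = cand
--                         break
--             if ref is None or ref[1] == -1: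
--                 continue
--             if ref[0] < best_b:
--                 best_b = ref[0]
--                 best = key
--         if best is not None:
--             keep.add(best)
--     return keep
-- ===== SOURCE B (Python) =====
-- def pick_representatives(clusters: list, per_pair: dict, grid: list[int]):
--     mid_q = grid[len(grid) // 2]  # mid-range q point as reference
--     probe = [mid_q] + grid        # lookup order: mid-range first, then the grid in order
--     # pass 1: resolve every clustered key to its reference bitrate (first valid q in probe order)
--     rate = {}
--     for grp in clusters:
--         for key in grp:
--             qmap = per_pair[key]
--             for q in probe:
--                 c = qmap.get(q)
--                 if c is not None and c[1] != -1:
--                     rate[key] = c[0]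
--                     break
--     # pass 2: stable-sort each cluster's resolvable keys by bitrate; the head is the representative
--     keep = set()
--     for grp in clusters:
--         ranked = sorted((k for k in grp if k in rate), key=lambda k: rate[k])
--         if ranked:
--             keep.add(ranked[0])
--     return keep
-- ===== Notes on version B (the rewrite author's own statement) =====
-- stated objective: alternative
-- what changed: B is two staged passes: pass 1 builds a dict mapping every clustered key to its resolved reference bitrate by scanning a single unified probe order [mid_q]+grid (replacing A's mid-lookup-then-fallback control flow), and pass 2 stable-sorts each cluster's resolvable keys by that bitrate and takes the head (replacing A's running best/best_b sentinel minimum).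
import Mathlib
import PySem

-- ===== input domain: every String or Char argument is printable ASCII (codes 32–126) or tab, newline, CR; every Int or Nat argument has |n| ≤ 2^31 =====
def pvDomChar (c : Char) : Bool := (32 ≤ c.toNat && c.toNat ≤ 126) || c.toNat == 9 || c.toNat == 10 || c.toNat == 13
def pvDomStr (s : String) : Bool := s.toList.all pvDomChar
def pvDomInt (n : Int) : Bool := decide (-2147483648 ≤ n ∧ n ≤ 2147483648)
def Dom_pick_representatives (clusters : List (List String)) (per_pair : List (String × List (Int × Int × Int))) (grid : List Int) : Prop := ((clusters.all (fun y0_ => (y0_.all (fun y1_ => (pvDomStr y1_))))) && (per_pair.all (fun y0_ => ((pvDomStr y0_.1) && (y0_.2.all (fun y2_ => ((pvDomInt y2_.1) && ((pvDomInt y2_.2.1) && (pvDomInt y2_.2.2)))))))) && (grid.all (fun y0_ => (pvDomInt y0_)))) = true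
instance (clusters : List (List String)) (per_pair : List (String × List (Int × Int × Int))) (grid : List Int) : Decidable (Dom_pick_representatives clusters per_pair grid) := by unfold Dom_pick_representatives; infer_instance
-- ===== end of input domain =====

-- B restructures the task into two staged passes: pass 1 resolves every clustered key to its
-- reference bitrate through one unified probe order [mid_q]+grid stored in a dict, pass 2
-- stable-sorts each cluster's resolvable keys by that bitrate and takes the head; objective: alternative.

-- ===== PORT A =====
-- the fallback 'for q in grid' loop: first candidate with cand[1] != -1, else ref unchanged
def pvFallbackA (qmap : List (Int × Int × Int)) (ref : Option (Int × Int)) : List Int → Option (Int × Int)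
  | [] => ref
  | q :: qs =>
    match PySem.Dict.get? (⟨qmap⟩ : PySem.Dict Int (Int × Int)) q with
    | some cand => if cand.2 ≠ -1 then some cand else pvFallbackA qmap ref qs
    | none => pvFallbackA qmap ref qs

-- A's inner loop body over 'key in grp'; state (best, best_b)
def pvStepA (per_pair : List (String × List (Int × Int × Int))) (grid : List Int) (mid_q : Int)
    (s : Option String × Int) (key : String) : Option String × Int :=
  let qmap : List (Int × Int × Int) := PySem.Dict.getD ⟨per_pair⟩ key []
  let ref0 := PySem.Dict.get? (⟨qmap⟩ : PySem.Dict Int (Int × Int)) mid_q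
  let ref : Option (Int × Int) :=
    match ref0 with
    | none => pvFallbackA qmap ref0 grid
    | some r => if r.2 = -1 then pvFallbackA qmap ref0 grid else ref0
  match ref with
  | none => s
  | some r => if r.2 = -1 then s else if r.1 < s.2 then (some key, r.1) else s

def pick_representatives (clusters : List (List String)) (per_pair : List (String × List (Int × Int × Int))) (grid : List Int) : List String :=
  let mid_q := PySem.List.pyGetD grid (PySem.Int.floordiv (grid.length : Int) 2) 0  -- grid[len(grid)//2]; Pre_ keeps grid nonempty
  clusters.foldl (fun keep grp =>
    match (grp.foldl (pvStepA per_pair grid mid_q) (none, 10 ^ 18)).1 with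
    | some k => PySem.Set.add keep k
    | none => keep) ([] : PySem.Set String)

-- ===== PORT B =====
-- B's pass-1 probe loop: 'for q in probe: c = qmap.get(q); if c is not None and c[1] != -1: ... break'
-- (c is a 2-tuple here, so Python's 'c is not None' is exactly the some-case)
def pvProbe (qmap : List (Int × Int × Int)) : List Int → Option Int
  | [] => none
  | q :: qs =>
    match PySem.Dict.get? (⟨qmap⟩ : PySem.Dict Int (Int × Int)) q with
    | some c => if c.2 ≠ -1 then some c.1 else pvProbe qmap qs
    | none => pvProbe qmap qs

def pick_representatives_alt (clusters : List (List String)) (per_pair : List (String × List (Int × Int × Int))) (grid : List Int) : List String :=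
  let mid_q := PySem.List.pyGetD grid (PySem.Int.floordiv (grid.length : Int) 2) 0
  let probe := mid_q :: grid
  -- pass 1: rate = {key: resolved bitrate}
  let rate : PySem.Dict String Int :=
    clusters.foldl (fun r grp =>
      grp.foldl (fun r key =>
        match pvProbe (PySem.Dict.getD ⟨per_pair⟩ key []) probe with
        | some b => r.insert key b
        | none => r) r) PySem.Dict.empty
  -- pass 2: stable sort by rate, head is the representative ('rate[k]' only reached on contained keys,
  -- so the key lookup is ported as getD with an unused default)
  clusters.foldl (fun keep grp =>
    match PySem.List.sorted (grp.filter (fun k => rate.contains k)) (fun k => rate.getD k 0) false with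
    | m :: _ => PySem.Set.add keep m
    | [] => keep) ([] : PySem.Set String)

-- ===== PRECONDITION & SPEC =====
-- Pre_ excludes exactly where Python A raises: empty grid (IndexError on grid[len(grid)//2])
-- and a cluster key absent from per_pair (KeyError on per_pair[key]).
def Pre_pick_representatives (clusters : List (List String)) (per_pair : List (String × List (Int × Int × Int))) (grid : List Int) : Prop :=
  grid ≠ [] ∧ ∀ grp ∈ clusters, ∀ key ∈ grp, (per_pair.any (fun p => p.1 == key)) = true
instance (clusters : List (List String)) (per_pair : List (String × List (Int × Int × Int))) (grid : List Int) : Decidable (Pre_pick_representatives clusters per_pair grid) := by unfold Pre_pick_representatives; infer_instance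

def pvWitness_pick_representatives : List (List String) × (List (String × List (Int × Int × Int))) × List Int :=
  ([["a", "b"], ["c"]],
   ([("a", [(0, 5, 0)]), ("b", [(0, 3, 1), (1, 2, 0)]), ("c", [(1, 9, -1)])],
    [0, 1]))

def Spec_pick_representatives (clusters : List (List String)) (per_pair : List (String × List (Int × Int × Int))) (grid : List Int) (out : List String) : Prop := out = pick_representatives_alt clusters per_pair grid
instance (clusters : List (List String)) (per_pair : List (String × List (Int × Int × Int))) (grid : List Int) (out : List String) : Decidable (Spec_pick_representatives clusters per_pair grid out) := by unfold Spec_pick_representatives; infer_instance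

-- ===== CLAIM (what is proved, stated in full; the proofs are below) =====
def Claim_equal_pick_representatives : Prop := ∀ (clusters : List (List String)) (per_pair : List (String × List (Int × Int × Int))) (grid : List Int), Dom_pick_representatives clusters per_pair grid → Pre_pick_representatives clusters per_pair grid → Spec_pick_representatives clusters per_pair grid (pick_representatives clusters per_pair grid)

-- ===== LEMMAS AND PROOFS =====

-- the resolved reference bitrate of a key (B's pass-1 value; proved equal to A's ref logic)
def pvRes (per_pair : List (String × List (Int × Int × Int))) (grid : List Int) (mid_q : Int) (key : String) : Option Int :=
  pvProbe (PySem.Dict.getD ⟨per_pair⟩ key []) (mid_q :: grid)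

-- the value A's second validity check lets through
def pvEff (r : Option (Int × Int)) : Option Int :=
  match r with
  | none => none
  | some r => if r.2 = -1 then none else some r.1

lemma pvEff_fallback (qmap : List (Int × Int × Int)) (ref0 : Option (Int × Int)) (h : pvEff ref0 = none) :
    ∀ qs : List Int, pvEff (pvFallbackA qmap ref0 qs) = pvProbe qmap qs := by
  intro qs
  induction qs with
  | nil => simpa [pvFallbackA, pvProbe] using h
  | cons q qs ih =>
    simp only [pvFallbackA, pvProbe]
    cases hg : PySem.Dict.get? (⟨qmap⟩ : PySem.Dict Int (Int × Int)) q with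
    | none => exact ih
    | some c =>
      by_cases hc : c.2 = -1
      · simp [hc, ih]
      · simp [hc, pvEff]

lemma pvStepA_eq (per_pair : List (String × List (Int × Int × Int))) (grid : List Int) (mid_q : Int)
    (s : Option String × Int) (key : String) :
    pvStepA per_pair grid mid_q s key =
      match pvRes per_pair grid mid_q key with
      | none => s
      | some b => if b < s.2 then (some key, b) else s := by
  have htail : ∀ (ref : Option (Int × Int)),
      (match ref with
       | none => s
       | some r => if r.2 = -1 then s else if r.1 < s.2 then (some key, r.1) else s) =
      (match pvEff ref with
       | none => s
       | some b => if b < s.2 then (some key, b) else s) := by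
    intro ref
    cases ref with
    | none => rfl
    | some r =>
      by_cases hr : r.2 = -1 <;> simp [pvEff, hr]
  simp only [pvStepA, pvRes, pvProbe]
  cases hg : PySem.Dict.get? (⟨(PySem.Dict.getD ⟨per_pair⟩ key [] : List (Int × Int × Int))⟩ : PySem.Dict Int (Int × Int)) mid_q with
  | none =>
    rw [htail, pvEff_fallback _ none (by simp [pvEff]) grid]
  | some r =>
    dsimp only
    by_cases hr : r.2 = -1
    · rw [if_pos hr, htail, pvEff_fallback _ (some r) (by simp [pvEff, hr]) grid,
          if_neg (not_not_intro hr)]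
    · simp [hr]

-- ---- the size bound on resolved bitrates (from Dom), so A's 10^18 sentinel never wins ----

lemma pvMemGet {κ ν : Type} [BEq κ] (l : List (κ × ν)) (k : κ) (v : ν)
    (h : PySem.Dict.get? (⟨l⟩ : PySem.Dict κ ν) k = some v) : ∃ p ∈ l, p.2 = v := by
  cases hf : List.find? (fun p => p.1 == k) l with
  | none => simp [PySem.Dict.get?, hf] at h
  | some p =>
    simp [PySem.Dict.get?, hf] at h
    exact ⟨p, List.mem_of_find?_eq_some hf, h⟩

lemma pvProbe_mem (qmap : List (Int × Int × Int)) :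
    ∀ (qs : List Int) (b : Int), pvProbe qmap qs = some b → ∃ m ∈ qmap, m.2.1 = b := by
  intro qs
  induction qs with
  | nil => intro b h; simp [pvProbe] at h
  | cons q qs ih =>
    intro b h
    simp only [pvProbe] at h
    cases hg : PySem.Dict.get? (⟨qmap⟩ : PySem.Dict Int (Int × Int)) q with
    | none => simp only [hg] at h; exact ih b h
    | some c =>
      simp only [hg] at h
      by_cases hc : c.2 = -1
      · rw [if_neg (not_not_intro hc)] at h; exact ih b h
      · rw [if_pos hc] at h
        obtain ⟨p, hp, hpv⟩ := pvMemGet qmap q c hg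
        exact ⟨p, hp, by rw [show p.2.1 = c.1 from congrArg Prod.fst hpv]; exact Option.some.inj h⟩

lemma pvRes_mem (per_pair : List (String × List (Int × Int × Int))) (grid : List Int) (mid_q : Int)
    (key : String) (b : Int) (h : pvRes per_pair grid mid_q key = some b) :
    ∃ e ∈ per_pair, ∃ m ∈ e.2, m.2.1 = b := by
  have hq : ∃ m ∈ (PySem.Dict.getD ⟨per_pair⟩ key [] : List (Int × Int × Int)), m.2.1 = b :=
    pvProbe_mem _ _ b h
  cases hget : PySem.Dict.get? (⟨per_pair⟩ : PySem.Dict String (List (Int × Int × Int))) key with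
  | none => simp only [PySem.Dict.getD, hget] at hq; simp at hq
  | some qm =>
    simp only [PySem.Dict.getD, hget] at hq
    obtain ⟨m, hm, hmb⟩ := hq
    obtain ⟨e, he, hev⟩ := pvMemGet per_pair key qm hget
    exact ⟨e, he, m, by rw [hev]; simpa using hm, hmb⟩

lemma pvBound (clusters : List (List String)) (per_pair : List (String × List (Int × Int × Int))) (grid : List Int)
    (hDom : Dom_pick_representatives clusters per_pair grid) (mid_q : Int) :
    ∀ key b, pvRes per_pair grid mid_q key = some b → b < 10 ^ 18 := by
  intro key b h
  obtain ⟨e, he, m, hm, hmb⟩ := pvRes_mem per_pair grid mid_q key b h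
  simp only [Dom_pick_representatives, Bool.and_eq_true, List.all_eq_true] at hDom
  have := (hDom.1.2 e he).2 m hm
  simp only [pvDomInt, decide_eq_true_eq] at this
  omega

-- ---- pass 1: the rate dict looks up pvRes ----

def pvRateStep (per_pair : List (String × List (Int × Int × Int))) (grid : List Int) (mid_q : Int)
    (r : PySem.Dict String Int) (key : String) : PySem.Dict String Int :=
  match pvProbe (PySem.Dict.getD ⟨per_pair⟩ key []) (mid_q :: grid) with
  | some b => r.insert key b
  | none => r

lemma pvRate_get (per_pair : List (String × List (Int × Int × Int))) (grid : List Int) (mid_q : Int) :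
    ∀ (ks : List String) (r : PySem.Dict String Int) (k : String),
    (ks.foldl (pvRateStep per_pair grid mid_q) r).get? k =
      if k ∈ ks ∧ (pvRes per_pair grid mid_q k).isSome then pvRes per_pair grid mid_q k else r.get? k := by
  intro ks
  induction ks with
  | nil => intro r k; simp
  | cons key ks ih =>
    intro r k
    rw [List.foldl_cons, ih]
    by_cases hk : k = key
    · subst hk
      cases hres : pvRes per_pair grid mid_q k with
      | none =>
        simp only [pvRateStep, pvRes] at *
        rw [hres]
        by_cases hmem : k ∈ ks <;> simp [hmem]
      | some b =>
        simp only [pvRateStep, pvRes] at *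
        rw [hres]
        by_cases hmem : k ∈ ks <;>
          simp [hmem, PySem.Dict.get?_insert_self]
    · have hstep : (pvRateStep per_pair grid mid_q r key).get? k = r.get? k := by
        simp only [pvRateStep]
        cases pvProbe (PySem.Dict.getD ⟨per_pair⟩ key []) (mid_q :: grid) with
        | none => rfl
        | some b => exact PySem.Dict.get?_insert_of_ne r b hk
      rw [hstep]
      by_cases hmem : k ∈ ks <;> simp [hmem, hk]

-- ---- head of a stable sort is the first minimum ----

lemma pvHead_insertBy {α : Type} (before : α → α → Bool) (x : α) (l : List α) :
    (PySem.List.insertBy before x l).head? =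
      match l.head? with
      | none => some x
      | some y => if before x y then some x else some y := by
  cases l with
  | nil => rfl
  | cons y ys =>
    simp only [PySem.List.insertBy, List.head?]
    by_cases h : before x y <;> simp [h]

lemma pvHead_foldl_insertBy {α κ : Type} [LT κ] [DecidableLT κ] (key : α → κ) :
    ∀ (xs : List α) (acc : List α),
    (xs.foldl (fun acc x => PySem.List.insertBy (fun a b => decide (key a < key b)) x acc) acc).head? =
      xs.foldl (fun o x =>
        match o with
        | none => some x
        | some m => if key x < key m then some x else some m) acc.head? := by
  intro xs
  induction xs with
  | nil => intro acc; rfl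
  | cons x xs ih =>
    intro acc
    rw [List.foldl_cons, List.foldl_cons, ih, pvHead_insertBy]
    cases acc.head? with
    | none => rfl
    | some y => by_cases h : key x < key y <;> simp [h]

lemma pvHead_sorted_eq_min? {α κ : Type} [LT κ] [DecidableLT κ] (xs : List α) (key : α → κ) :
    (PySem.List.sorted xs key false).head? = PySem.List.min? xs key := by
  rw [PySem.List.sorted_eq_foldl_insertBy, pvHead_foldl_insertBy]
  rfl

-- the running-first-minimum step, and min? as a fold of it
def pvMinStep {α : Type} (f : α → Int) (o : Option α) (x : α) : Option α :=
  match o with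
  | none => some x
  | some m => if f x < f m then some x else some m

lemma pvMin?_eq {α : Type} (l : List α) (f : α → Int) :
    PySem.List.min? l f = l.foldl (pvMinStep f) none := by
  simp only [PySem.List.min?]
  exact PySem.List.foldl_congr_mem _ _ _ _ (fun acc x _ => by cases acc <;> rfl)

-- min? only looks at the keys of members
lemma pvMin?_key_congr {α : Type} (f g : α → Int) :
    ∀ (l : List α) (acc : Option α),
    (∀ x ∈ l, f x = g x) → (∀ m, acc = some m → f m = g m) →
    l.foldl (pvMinStep f) acc = l.foldl (pvMinStep g) acc := by
  intro l
  induction l with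
  | nil => intro acc _ _; rfl
  | cons x l ih =>
    intro acc hl hacc
    have hx : f x = g x := hl x List.mem_cons_self
    rw [List.foldl_cons, List.foldl_cons]
    have hstep : pvMinStep f acc x = pvMinStep g acc x := by
      cases acc with
      | none => rfl
      | some m => simp only [pvMinStep]; rw [hx, hacc m rfl]
    rw [hstep]
    apply ih _ (fun y hy => hl y (List.mem_cons_of_mem _ hy))
    intro m hm
    cases acc with
    | none => exact hl m (by simp_all [pvMinStep])
    | some m' =>
      by_cases h : g x < g m' <;> simp [pvMinStep, h] at hm <;> subst hm
      · exact hx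
      · exact hacc m' rfl

-- ---- A's running-min fold equals min? over the resolvable keys ----

lemma pvFoldSome (per_pair : List (String × List (Int × Int × Int))) (grid : List Int) (mid_q : Int) :
    ∀ (rest : List String) (k : String) (b : Int), pvRes per_pair grid mid_q k = some b →
    rest.foldl (fun s key =>
        match pvRes per_pair grid mid_q key with
        | none => s
        | some b' => if b' < s.2 then (some key, b') else s) ((some k : Option String), b)
      = match (rest.filter (fun x => (pvRes per_pair grid mid_q x).isSome)).foldl
            (pvMinStep (fun x => (pvRes per_pair grid mid_q x).getD 0))
            (some k) with
        | some m => ((some m : Option String), (pvRes per_pair grid mid_q m).getD 0)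
        | none => (none, 0) := by
  intro rest
  induction rest with
  | nil => intro k b hk; simp [hk]
  | cons key rest ih =>
    intro k b hk
    cases hkey : pvRes per_pair grid mid_q key with
    | none => simpa [List.foldl, pvMinStep, hkey] using ih k b hk
    | some b' =>
      by_cases h : b' < b
      · have := ih key b' hkey
        simpa [List.foldl, pvMinStep, hkey, hk, h] using this
      · have := ih k b hk
        simpa [List.foldl, pvMinStep, hkey, hk, h] using this

lemma pvFoldA (per_pair : List (String × List (Int × Int × Int))) (grid : List Int) (mid_q : Int) :
    ∀ (grp : List String),
    (∀ key ∈ grp, ∀ b, pvRes per_pair grid mid_q key = some b → b < 10 ^ 18) →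
    (grp.foldl (fun s key =>
        match pvRes per_pair grid mid_q key with
        | none => s
        | some b => if b < s.2 then (some key, b) else s) ((none : Option String), 10 ^ 18)).1
      = PySem.List.min? (grp.filter (fun x => (pvRes per_pair grid mid_q x).isSome))
          (fun x => (pvRes per_pair grid mid_q x).getD 0) := by
  intro grp
  induction grp with
  | nil => intro _; rfl
  | cons key grp ih =>
    intro hb
    cases hk : pvRes per_pair grid mid_q key with
    | none =>
      have := ih (fun k hk' b h => hb k (List.mem_cons_of_mem _ hk') b h)
      simpa [List.foldl, hk] using this
    | some b =>
      have hlt : b < 10 ^ 18 := hb key List.mem_cons_self b hk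
      rw [List.foldl_cons]
      simp only [hk, show b < (((none : Option String), (10:Int) ^ 18) : Option String × Int).2 from hlt, if_pos]
      rw [pvFoldSome per_pair grid mid_q grp key b hk]
      have hfil : (key :: grp).filter (fun x => (pvRes per_pair grid mid_q x).isSome)
          = key :: grp.filter (fun x => (pvRes per_pair grid mid_q x).isSome) := by
        simp [hk]
      rw [hfil, pvMin?_eq]
      simp only [List.foldl_cons, pvMinStep]
      cases hres : (grp.filter (fun x => (pvRes per_pair grid mid_q x).isSome)).foldl
          (pvMinStep (fun x => (pvRes per_pair grid mid_q x).getD 0))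
          (some key) with
      | none => simp
      | some m => simp

-- ---- the per-group equality, then the theorem ----

theorem pick_representatives_spec : Claim_equal_pick_representatives := by
  intro clusters per_pair grid hDom _hPre
  unfold Spec_pick_representatives
  simp only [pick_representatives, pick_representatives_alt]
  set mid_q := PySem.List.pyGetD grid (PySem.Int.floordiv (grid.length : Int) 2) 0 with hmid
  set rate : PySem.Dict String Int :=
    clusters.foldl (fun r grp =>
      grp.foldl (fun r key =>
        match pvProbe (PySem.Dict.getD ⟨per_pair⟩ key []) (mid_q :: grid) with
        | some b => r.insert key b
        | none => r) r) PySem.Dict.empty with hrate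
  -- pass-1 dict characterisation: rate.get? k = pvRes k for every clustered key
  have hrget : ∀ k ∈ clusters.flatten, rate.get? k = pvRes per_pair grid mid_q k := by
    intro k hk
    have hfold : rate = clusters.flatten.foldl (pvRateStep per_pair grid mid_q) PySem.Dict.empty := by
      rw [hrate, List.foldl_flatten]; rfl
    rw [hfold, pvRate_get]
    by_cases hs : (pvRes per_pair grid mid_q k).isSome
    · simp [hk, hs]
    · have hnone : pvRes per_pair grid mid_q k = none :=
        Option.not_isSome_iff_eq_none.mp (by simpa using hs)
      simp [hnone, PySem.Dict.get?, PySem.Dict.empty]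
  apply PySem.List.foldl_congr_mem
  intro keep grp hgrp
  have hmem : ∀ k ∈ grp, rate.get? k = pvRes per_pair grid mid_q k :=
    fun k hk => hrget k (List.mem_flatten.2 ⟨grp, hgrp, hk⟩)
  -- A side: running min = min? over resolvable keys
  have hA : (grp.foldl (pvStepA per_pair grid mid_q) (none, 10 ^ 18)).1
      = PySem.List.min? (grp.filter (fun x => (pvRes per_pair grid mid_q x).isSome))
          (fun x => (pvRes per_pair grid mid_q x).getD 0) := by
    have hstep : grp.foldl (pvStepA per_pair grid mid_q) ((none : Option String), 10 ^ 18)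
        = grp.foldl (fun s key =>
            match pvRes per_pair grid mid_q key with
            | none => s
            | some b => if b < s.2 then (some key, b) else s) (none, 10 ^ 18) :=
      PySem.List.foldl_congr_mem _ _ _ _ (fun s key _ => pvStepA_eq per_pair grid mid_q s key)
    rw [hstep]
    exact pvFoldA per_pair grid mid_q grp
      (fun key _ b h => pvBound clusters per_pair grid hDom mid_q key b h)
  -- B side: head of the stable sort = min? over the same keys with the same key function
  have hfil : grp.filter (fun k => rate.contains k)
      = grp.filter (fun x => (pvRes per_pair grid mid_q x).isSome) := by
    apply List.filter_congr
    intro x hx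
    rw [PySem.Dict.contains_eq_isSome_get?, hmem x hx]
  have hB : (PySem.List.sorted (grp.filter (fun k => rate.contains k)) (fun k => rate.getD k 0) false).head?
      = PySem.List.min? (grp.filter (fun x => (pvRes per_pair grid mid_q x).isSome))
          (fun x => (pvRes per_pair grid mid_q x).getD 0) := by
    rw [pvHead_sorted_eq_min?, hfil, pvMin?_eq, pvMin?_eq]
    apply pvMin?_key_congr
    · intro x hx
      have hx' : x ∈ grp := List.mem_of_mem_filter hx
      simp [PySem.Dict.getD, hmem x hx']
    · intro m hm; simp at hm
  rw [hA]
  cases hsorted : PySem.List.sorted (grp.filter (fun k => rate.contains k)) (fun k => rate.getD k 0) false with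
  | nil =>
    have : PySem.List.min? (grp.filter (fun x => (pvRes per_pair grid mid_q x).isSome))
        (fun x => (pvRes per_pair grid mid_q x).getD 0) = none := by
      rw [← hB, hsorted]; rfl
    simp [this]
  | cons m t =>
    have : PySem.List.min? (grp.filter (fun x => (pvRes per_pair grid mid_q x).isSome))
        (fun x => (pvRes per_pair grid mid_q x).getD 0) = some m := by
      rw [← hB, hsorted]; rfl
    simp [this]
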